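-- pv_equiv track=rewrite | github.com/gkseogus/coding_test | 프로그래머스/unrated/181864. 문자열 바꿔서 찾기/문자열 바꿔서 찾기.py | solution
-- ===== SOURCE A (Python) =====
-- def solution(myString, pat):
--     newString = ''
--     for i in myString:
--         if(i == 'A'):
--             newString += 'B'
--         else:
--             newString += 'A'
--     return 1 if(pat in newString) else 0
-- ===== SOURCE B (Python) =====
-- def solution(myString, pat):
--     n, m = len(myString), len(pat)
--     i = 0
--     while i + m <= n:
--         j = 0
--         while j < m and ((pat[j] == 'B') if myString[i + j] == 'A' else (pat[j] == 'A')):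
--             j += 1
--         if j == m:
--             return 1
--         i += 1
--     return 0
-- ===== Notes on version B (the rewrite author's own statement) =====
-- stated objective: alternative
-- what changed: Instead of building a recoded copy of myString ('A'->'B', everything else->'A') and testing substring membership, B never builds any copy: it slides a window over the original string and matches pat char-by-char with the predicate "pat char is 'B' iff the haystack char is 'A'".
import Mathlib
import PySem

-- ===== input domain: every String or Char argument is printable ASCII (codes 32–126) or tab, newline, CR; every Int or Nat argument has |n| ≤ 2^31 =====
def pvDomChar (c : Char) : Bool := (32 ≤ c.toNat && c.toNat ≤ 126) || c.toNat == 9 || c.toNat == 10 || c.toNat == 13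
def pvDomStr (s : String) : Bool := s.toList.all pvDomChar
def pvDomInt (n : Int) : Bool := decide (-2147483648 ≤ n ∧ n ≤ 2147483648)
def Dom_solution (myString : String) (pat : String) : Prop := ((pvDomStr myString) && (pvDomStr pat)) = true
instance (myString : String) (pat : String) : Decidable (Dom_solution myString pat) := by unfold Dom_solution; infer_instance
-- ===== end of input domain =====

-- B changes the algorithm: instead of building the recoded copy of myString and testing
-- `pat in newString`, it scans the ORIGINAL string with a sliding window, matching pat
-- char-by-char under the predicate "pat char = 'B' iff haystack char = 'A'" (alternative, no copy built).

-- ===== PORT A =====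
-- newString built character by character: 'A' -> 'B', anything else -> 'A'; then `pat in newString`.
def solution (myString : String) (pat : String) : Int :=
  let newString : List Char :=
    myString.toList.foldl (fun acc i => acc ++ [if i = 'A' then 'B' else 'A']) []
  if PySem.Chars.isIn pat.toList newString then 1 else 0

-- ===== PORT B =====
-- Source B's inner while loop: advance j while j < m and the window predicate holds; returns the final j
-- (fuel = p.length bounds the iteration count; it only makes the loop total, the computation is Source B's)
def solnAltInner (s p : List Char) (i : Nat) : Nat → Nat → Nat
  | 0, j => j
  | fuel + 1, j =>
    if j < p.length ∧ (if s.getD (i + j) ' ' = 'A' then p.getD j ' ' = 'B' else p.getD j ' ' = 'A') then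
      solnAltInner s p i fuel (j + 1)
    else j

-- Source B's outer while loop over window starts i (fuel = s.length + 1 bounds the iteration count)
def solnAltOuter (s p : List Char) : Nat → Nat → Int
  | 0, _ => 0
  | fuel + 1, i =>
    if i + p.length ≤ s.length then
      if solnAltInner s p i p.length 0 = p.length then 1 else solnAltOuter s p fuel (i + 1)
    else 0

def solution_alt (myString : String) (pat : String) : Int :=
  solnAltOuter myString.toList pat.toList (myString.toList.length + 1) 0

-- ===== PRECONDITION & SPEC =====
def Spec_solution (myString : String) (pat : String) (out : Int) : Prop := out = solution_alt myString pat
instance (myString : String) (pat : String) (out : Int) : Decidable (Spec_solution myString pat out) := by unfold Spec_solution; infer_instance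

-- ===== CLAIM (what is proved, stated in full; the proofs are below) =====
def Claim_equal_solution : Prop := ∀ (myString : String) (pat : String), Dom_solution myString pat → Spec_solution myString pat (solution myString pat)

-- ===== LEMMAS AND PROOFS =====

def solnRecode (c : Char) : Char := if c = 'A' then 'B' else 'A'

-- matches-as-prefix characterisation of the inner loop (bridging helper)
def solnAltMatches (hay : List Char) (p : List Char) : Bool :=
  match p, hay with
  | [], _ => true
  | _ :: _, [] => false
  | pc :: ps, hc :: hs =>
      (if hc = 'A' then pc = 'B' else pc = 'A') && solnAltMatches hs ps

theorem solnAltMatches_iff (p hay : List Char) :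
    solnAltMatches hay p = true ↔ p <+: hay.map solnRecode := by
  induction p generalizing hay with
  | nil => simp [solnAltMatches]
  | cons pc ps ih =>
    cases hay with
    | nil => simp [solnAltMatches]
    | cons hc hs =>
      have hch : ((if hc = 'A' then decide (pc = 'B') else decide (pc = 'A')) = true)
          ↔ pc = solnRecode hc := by
        unfold solnRecode; split_ifs <;> simp
      simp only [solnAltMatches, Bool.and_eq_true, List.map_cons, List.cons_prefix_cons]
      exact and_congr hch (ih hs)

theorem solnAltInner_iff (s p : List Char) (i : Nat) :
    ∀ fuel j, p.length - j ≤ fuel → j ≤ p.length → i + p.length ≤ s.length →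
    ((solnAltInner s p i fuel j = p.length) ↔ solnAltMatches (s.drop (i + j)) (p.drop j) = true) := by
  intro fuel
  induction fuel with
  | zero =>
    intro j hfl hj _
    have hje : j = p.length := by omega
    subst hje
    simp [solnAltInner, solnAltMatches]
  | succ k ih =>
    intro j hfl hj hin
    by_cases hjlt : j < p.length
    · have hij : i + j < s.length := by omega
      have hpd : p.drop j = p[j] :: p.drop (j + 1) := List.drop_eq_getElem_cons hjlt
      have hsd : s.drop (i + j) = s[i + j] :: s.drop (i + j + 1) := List.drop_eq_getElem_cons hij
      have hgp : p.getD j ' ' = p[j] := List.getD_eq_getElem p ' ' hjlt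
      have hgs : s.getD (i + j) ' ' = s[i + j] := List.getD_eq_getElem s ' ' hij
      rw [hpd, hsd]
      by_cases hcond : (if s[i + j] = 'A' then p[j] = 'B' else p[j] = 'A')
      · have hb : (if s[i + j] = 'A' then decide (p[j] = 'B') else decide (p[j] = 'A')) = true := by
          split_ifs at hcond ⊢ <;> simp [hcond]
        show (if j < p.length ∧ _ then solnAltInner s p i k (j + 1) else j) = p.length ↔ _
        rw [if_pos ⟨hjlt, by rw [hgs, hgp]; exact hcond⟩]
        have hrest := ih (j + 1) (by omega) (by omega) hin
        rw [show s.drop (i + j + 1) = s.drop (i + (j + 1)) from rfl]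
        simp only [solnAltMatches, hb, Bool.true_and]
        exact hrest
      · have hb : (if s[i + j] = 'A' then decide (p[j] = 'B') else decide (p[j] = 'A')) = false := by
          split_ifs at hcond ⊢ <;> simp [hcond]
        show (if j < p.length ∧ _ then solnAltInner s p i k (j + 1) else j) = p.length ↔ _
        rw [if_neg (by rintro ⟨-, hq⟩; exact hcond (by rwa [hgs, hgp] at hq))]
        refine iff_of_false (by omega) ?_
        simp [solnAltMatches, hb]
    · have hje : j = p.length := by omega
      subst hje
      show (if p.length < p.length ∧ _ then solnAltInner s p i k (p.length + 1) else p.length) = p.length ↔ _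
      rw [if_neg (by rintro ⟨h, -⟩; omega)]
      simp [solnAltMatches]

theorem solnAltOuter_succ (s p : List Char) (f i : Nat) :
    solnAltOuter s p (f + 1) i = if i + p.length ≤ s.length then
        (if solnAltInner s p i p.length 0 = p.length then 1 else solnAltOuter s p f (i + 1))
      else 0 := rfl

theorem solnAltOuter_one_iff (s p : List Char) :
    ∀ fuel i, s.length + 1 - i ≤ fuel → (solnAltOuter s p fuel i = 1 ↔
      ∃ k, i + k + p.length ≤ s.length ∧ p <+: List.map solnRecode (s.drop (i + k))) := by
  intro fuel
  induction fuel with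
  | zero =>
    intro i hfl
    exact iff_of_false (by simp [solnAltOuter]) (by rintro ⟨k, hk, -⟩; omega)
  | succ f ih =>
    intro i hfl
    rw [solnAltOuter_succ]
    by_cases hg : i + p.length ≤ s.length
    · rw [if_pos hg]
      by_cases hm : solnAltInner s p i p.length 0 = p.length
      · rw [if_pos hm]
        refine iff_of_true rfl ⟨0, by omega, ?_⟩
        have := (solnAltInner_iff s p i p.length 0 (by omega) (Nat.zero_le _) hg).mp hm
        simpa using (solnAltMatches_iff p (s.drop i)).mp (by simpa using this)
      · rw [if_neg hm, ih (i + 1) (by omega)]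
        constructor
        · rintro ⟨k, hk1, hk2⟩
          refine ⟨k + 1, by omega, ?_⟩
          have h1 : i + 1 + k = i + (k + 1) := by omega
          rwa [h1] at hk2
        · rintro ⟨k, hk1, hk2⟩
          cases k with
          | zero =>
            exfalso
            apply hm
            refine (solnAltInner_iff s p i p.length 0 (by omega) (Nat.zero_le _) hg).mpr ?_
            simpa using (solnAltMatches_iff p (s.drop i)).mpr (by simpa using hk2)
          | succ k' =>
            refine ⟨k', by omega, ?_⟩
            have h1 : i + 1 + k' = i + (k' + 1) := by omega
            rwa [h1]
    · rw [if_neg hg]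
      exact iff_of_false (by norm_num) (by rintro ⟨k, hk, -⟩; omega)

theorem solnAltOuter_zero_or_one (s p : List Char) :
    ∀ fuel i, solnAltOuter s p fuel i = 0 ∨ solnAltOuter s p fuel i = 1 := by
  intro fuel
  induction fuel with
  | zero => intro i; exact Or.inl rfl
  | succ f ih =>
    intro i
    rw [solnAltOuter_succ]
    split
    · split
      · exact Or.inr rfl
      · exact ih (i + 1)
    · exact Or.inl rfl

theorem solution_spec : Claim_equal_solution := by
  intro myString pat _
  unfold Spec_solution solution solution_alt
  rw [show (fun acc (i : Char) => acc ++ [if i = 'A' then 'B' else 'A'])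
        = (fun acc i => acc ++ [solnRecode i]) from rfl,
    PySem.List.foldl_append_singleton_eq_map]
  show (if PySem.Chars.isIn pat.toList ([] ++ List.map solnRecode myString.toList) = true then 1 else 0)
      = solnAltOuter myString.toList pat.toList (myString.toList.length + 1) 0
  rw [List.nil_append]
  set s := myString.toList with hs
  set p := pat.toList with hp
  have hbridge : (∃ k, 0 + k + p.length ≤ s.length ∧ p <+: List.map solnRecode (s.drop (0 + k)))
      ↔ PySem.Chars.isIn p (List.map solnRecode s) = true := by
    rw [← PySem.Chars.exists_prefix_drop_iff_isIn]
    constructor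
    · rintro ⟨k, -, hk⟩
      refine ⟨k, ?_⟩
      rw [← List.map_drop]
      simpa using hk
    · rintro ⟨j, hj⟩
      rw [← List.map_drop] at hj
      by_cases hjn : j ≤ s.length
      · refine ⟨j, ?_, by simpa using hj⟩
        have hlen := hj.length_le
        simp only [List.length_map, List.length_drop] at hlen
        omega
      · have hdrop : s.drop j = [] := List.drop_eq_nil_of_le (by omega)
        rw [hdrop] at hj
        have hpe : p = [] := List.prefix_nil.mp (by simpa using hj)
        exact ⟨0, by simp [hpe], by simp [hpe]⟩
  rcases hc : PySem.Chars.isIn p (List.map solnRecode s) with _ | _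
  · rcases solnAltOuter_zero_or_one s p (s.length + 1) 0 with h | h
    · rw [if_neg (by simp), h]
    · exact absurd (hbridge.mp ((solnAltOuter_one_iff s p (s.length + 1) 0 (by omega)).mp h)) (by simp [hc])
  · rw [if_pos rfl]
    exact ((solnAltOuter_one_iff s p (s.length + 1) 0 (by omega)).mpr (hbridge.mpr hc)).symm
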